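-- pv_equiv track=rewrite | github.com/ashione/Velaria | python_api/velaria/embedding.py | _split_where_sql_clauses
-- ===== SOURCE A (Python) =====
-- def _split_where_sql_clauses(where_sql: str) -> list[str]:
--     clauses: list[str] = []
--     current: list[str] = []
--     in_single = False
--     in_double = False
--     i = 0
--     while i < len(where_sql):
--         ch = where_sql[i]
--         if ch == "'" and not in_double:
--             in_single = not in_single
--             current.append(ch)
--             i += 1
--             continue
--         if ch == '"' and not in_single:
--             in_double = not in_double
--             current.append(ch)
--             i += 1
--             continue
--         if not in_single and not in_double and where_sql[i : i + 5].upper() == " AND ":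
--             clause = "".join(current).strip()
--             if clause:
--                 clauses.append(clause)
--             current = []
--             i += 5
--             continue
--         current.append(ch)
--         i += 1
--     tail = "".join(current).strip()
--     if tail:
--         clauses.append(tail)
--     return clauses
-- ===== SOURCE B (Python) =====
-- def _split_where_sql_clauses(where_sql: str) -> list[str]:
--     # Pass 1: quote mask — protected[i] = True iff position i lies inside quotes.
--     protected = []
--     in_single = False
--     in_double = False
--     for ch in where_sql:
--         protected.append(in_single or in_double)
--         if ch == "'" and not in_double:
--             in_single = not in_single
--         elif ch == '"' and not in_single:
--             in_double = not in_double
--     # Pass 2: jump between candidate " and " windows in a lowered copy and slice segments.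
--     lowered = where_sql.lower()
--     clauses = []
--     seg_start = 0
--     pos = 0
--     while True:
--         idx = lowered.find(" and ", pos)
--         if idx == -1:
--             break
--         if protected[idx]:
--             pos = idx + 1
--             continue
--         clause = where_sql[seg_start:idx].strip()
--         if clause:
--             clauses.append(clause)
--         seg_start = idx + 5
--         pos = idx + 5
--     tail = where_sql[seg_start:].strip()
--     if tail:
--         clauses.append(tail)
--     return clauses
-- ===== Notes on version B (the rewrite author's own statement) =====
-- stated objective: faster
-- what changed: B replaces A's single char-by-char loop that builds each clause one character at a time with two passes: a precomputed quote-protection mask, then a str.find-driven loop over a lowered copy that jumps between candidate separator windows and slices whole segments out of the original string.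
import Mathlib
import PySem

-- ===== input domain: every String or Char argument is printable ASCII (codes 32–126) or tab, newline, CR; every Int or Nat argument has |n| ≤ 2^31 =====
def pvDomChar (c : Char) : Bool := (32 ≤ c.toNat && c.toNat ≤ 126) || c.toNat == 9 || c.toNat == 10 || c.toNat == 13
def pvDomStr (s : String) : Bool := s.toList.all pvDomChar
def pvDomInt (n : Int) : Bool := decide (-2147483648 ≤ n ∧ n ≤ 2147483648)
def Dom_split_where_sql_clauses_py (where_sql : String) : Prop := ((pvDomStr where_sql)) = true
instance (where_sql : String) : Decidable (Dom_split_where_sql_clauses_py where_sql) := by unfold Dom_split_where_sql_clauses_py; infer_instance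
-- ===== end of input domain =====

-- B replaces A's char-by-char accumulator with two passes: a quote mask, then find-based
-- jumps between candidate separator windows, slicing segments out (objective: faster,
-- constant-factor; measured).

-- ===== PORT A =====
-- literal transliteration of the Python while-loop; state (clauses, current, in_single, in_double, i)
def pvALoop (l : List Char) (clauses : List String) (current : List Char)
    (in_single in_double : Bool) (i : Nat) : List String :=
  if h : i < l.length then
    let ch := l[i]
    if ch = '\'' ∧ in_double = false then
      pvALoop l clauses (current ++ [ch]) (!in_single) in_double (i + 1)
    else if ch = '"' ∧ in_single = false then
      pvALoop l clauses (current ++ [ch]) in_single (!in_double) (i + 1)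
    else if in_single = false ∧ in_double = false ∧
        PySem.Chars.upper (PySem.List.slice l (some (i : Int)) (some ((i : Int) + 5))) = " AND ".toList then
      let clause := PySem.Chars.strip current
      pvALoop l (if clause ≠ [] then clauses ++ [String.mk clause] else clauses) [] in_single in_double (i + 5)
    else
      pvALoop l clauses (current ++ [ch]) in_single in_double (i + 1)
  else
    let tail := PySem.Chars.strip current
    if tail ≠ [] then clauses ++ [String.mk tail] else clauses
termination_by l.length - i
decreasing_by all_goals omega

def split_where_sql_clauses_py (where_sql : String) : List String :=
  pvALoop where_sql.toList [] [] false false 0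

-- ===== PORT B =====
-- pass 1 of Source B: fold building the quote mask (protected, in_single, in_double)
def pvMaskLoop (st : List Bool × Bool × Bool) (ch : Char) : List Bool × Bool × Bool :=
  let prot := st.1 ++ [st.2.1 || st.2.2]
  if ch = '\'' ∧ st.2.2 = false then (prot, !st.2.1, st.2.2)
  else if ch = '"' ∧ st.2.1 = false then (prot, st.2.1, !st.2.2)
  else (prot, st.2.1, st.2.2)

-- pass 2 of Source B: the find-driven while-loop; pos strictly increases each iteration and
-- stays ≤ len, so fuel len+2 is enough (fuel only makes the recursion structural)
def pvBLoop (l low : List Char) (mask : List Bool) (fuel : Nat)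
    (clauses : List String) (seg_start pos : Nat) : List String :=
  match fuel with
  | 0 => clauses
  | fuel + 1 =>
    let idx := PySem.Chars.findFrom low " and ".toList (pos : Int) none
    if idx = -1 then
      let tail := PySem.Chars.strip (PySem.List.slice l (some (seg_start : Int)) none)
      if tail ≠ [] then clauses ++ [String.mk tail] else clauses
    else if mask.getD idx.toNat false then  -- idx is a valid index when ≠ -1, so getD is exact for protected[idx]
      pvBLoop l low mask fuel clauses seg_start (idx.toNat + 1)
    else
      let clause := PySem.Chars.strip (PySem.List.slice l (some (seg_start : Int)) (some idx))
      pvBLoop l low mask fuel (if clause ≠ [] then clauses ++ [String.mk clause] else clauses)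
        (idx.toNat + 5) (idx.toNat + 5)

def split_where_sql_clauses_py_alt (where_sql : String) : List String :=
  let l := where_sql.toList
  let mask := (l.foldl pvMaskLoop ([], false, false)).1
  pvBLoop l (PySem.Chars.lower l) mask (l.length + 2) [] 0 0

-- ===== PRECONDITION & SPEC =====
def Spec_split_where_sql_clauses_py (where_sql : String) (out : List String) : Prop := out = split_where_sql_clauses_py_alt where_sql
instance (where_sql : String) (out : List String) : Decidable (Spec_split_where_sql_clauses_py where_sql out) := by unfold Spec_split_where_sql_clauses_py; infer_instance

-- ===== CLAIM (what is proved, stated in full; the proofs are below) =====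
def Claim_equal_split_where_sql_clauses_py : Prop := ∀ (where_sql : String), Dom_split_where_sql_clauses_py where_sql → Spec_split_where_sql_clauses_py where_sql (split_where_sql_clauses_py where_sql)

-- ===== LEMMAS AND PROOFS =====

-- the quote-state step shared by both loops (proof-side abstraction)
def pvQStep (st : Bool × Bool) (ch : Char) : Bool × Bool :=
  if ch = '\'' ∧ st.2 = false then (!st.1, st.2)
  else if ch = '"' ∧ st.1 = false then (st.1, !st.2)
  else st

-- the mask B's first pass produces, described recursively
def pvMaskSpec (xs : List Char) (s d : Bool) : List Bool :=
  match xs with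
  | [] => []
  | c :: r =>
    (s || d) :: pvMaskSpec r (pvQStep (s, d) c).1 (pvQStep (s, d) c).2

theorem pvMaskLoop_step (st : List Bool × Bool × Bool) (ch : Char) :
    pvMaskLoop st ch = (st.1 ++ [st.2.1 || st.2.2], pvQStep st.2 ch) := by
  unfold pvMaskLoop pvQStep
  split_ifs <;> rfl

theorem pvMaskLoop_eq (xs : List Char) : ∀ (m : List Bool) (s d : Bool),
    xs.foldl pvMaskLoop (m, s, d) = (m ++ pvMaskSpec xs s d, xs.foldl pvQStep (s, d)) := by
  induction xs with
  | nil => intro m s d; simp [pvMaskSpec]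
  | cons c r ih =>
    intro m s d
    simp only [List.foldl_cons, pvMaskLoop_step, pvMaskSpec]
    rw [show pvQStep (s, d) c = ((pvQStep (s, d) c).1, (pvQStep (s, d) c).2) from rfl, ih]
    simp

theorem pvMaskSpec_getD (xs : List Char) : ∀ (s d : Bool) (i : Nat), i < xs.length →
    (pvMaskSpec xs s d).getD i false
      = (((xs.take i).foldl pvQStep (s, d)).1 || ((xs.take i).foldl pvQStep (s, d)).2) := by
  induction xs with
  | nil => intro s d i h; simp at h
  | cons c r ih =>
    intro s d i h
    cases i with
    | zero => simp [pvMaskSpec]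
    | succ j =>
      simp only [pvMaskSpec, List.getD_cons_succ, List.take_succ_cons, List.foldl_cons]
      rw [ih _ _ j (by simpa using h)]

theorem pvQs_succ (l : List Char) (i : Nat) (h : i < l.length) (st : Bool × Bool) :
    (l.take (i + 1)).foldl pvQStep st = pvQStep ((l.take i).foldl pvQStep st) l[i] := by
  rw [List.take_succ, List.getElem?_eq_getElem h]
  simp only [Option.toList_some, List.foldl_append, List.foldl_cons, List.foldl_nil]

-- per-character relation between Python's upper() and lower() on the five window characters
theorem pvCh (c : Char) :
    (PySem.Chars.upperChar c = ' ' ↔ c = ' ') ∧ (PySem.Chars.lowerChar c = ' ' ↔ c = ' ') ∧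
    (PySem.Chars.upperChar c = 'A' ↔ PySem.Chars.lowerChar c = 'a') ∧
    (PySem.Chars.upperChar c = 'N' ↔ PySem.Chars.lowerChar c = 'n') ∧
    (PySem.Chars.upperChar c = 'D' ↔ PySem.Chars.lowerChar c = 'd') := by
  by_cases hl : 'a' ≤ c ∧ c ≤ 'z'
  · obtain ⟨m, h1, h2, rfl⟩ : ∃ m, 97 ≤ m ∧ m ≤ 122 ∧ c = Char.ofNat m :=
      ⟨c.toNat, UInt32.le_iff_toNat_le.mp (Char.le_def.mp hl.1),
       UInt32.le_iff_toNat_le.mp (Char.le_def.mp hl.2), (Char.ofNat_toNat c).symm⟩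
    interval_cases m <;> decide
  · by_cases hu : 'A' ≤ c ∧ c ≤ 'Z'
    · obtain ⟨m, h1, h2, rfl⟩ : ∃ m, 65 ≤ m ∧ m ≤ 90 ∧ c = Char.ofNat m :=
        ⟨c.toNat, UInt32.le_iff_toNat_le.mp (Char.le_def.mp hu.1),
         UInt32.le_iff_toNat_le.mp (Char.le_def.mp hu.2), (Char.ofNat_toNat c).symm⟩
      interval_cases m <;> decide
    · have hup : PySem.Chars.upperChar c = c := by
        unfold PySem.Chars.upperChar PySem.Chars.islower
        rw [if_neg]
        simp only [Bool.and_eq_true, decide_eq_true_eq]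
        exact hl
      have hlo : PySem.Chars.lowerChar c = c := by
        unfold PySem.Chars.lowerChar PySem.Chars.isupper
        rw [if_neg]
        simp only [Bool.and_eq_true, decide_eq_true_eq]
        exact hu
      rw [hup, hlo]
      refine ⟨Iff.rfl, Iff.rfl, ?_, ?_, ?_⟩ <;> constructor <;> intro h <;> subst h
      · exact absurd ⟨by decide, by decide⟩ hu
      · exact absurd ⟨by decide, by decide⟩ hl
      · exact absurd ⟨by decide, by decide⟩ hu
      · exact absurd ⟨by decide, by decide⟩ hl
      · exact absurd ⟨by decide, by decide⟩ hu
      · exact absurd ⟨by decide, by decide⟩ hl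

theorem pvUpLow5 (w : List Char) :
    PySem.Chars.upper w = " AND ".toList ↔ PySem.Chars.lower w = " and ".toList := by
  have hU : " AND ".toList = [' ', 'A', 'N', 'D', ' '] := by decide
  have hL : " and ".toList = [' ', 'a', 'n', 'd', ' '] := by decide
  rw [hU, hL]
  by_cases hw : w.length = 5
  case neg =>
    constructor <;> intro h <;> exfalso <;> apply hw <;>
      (have := congrArg List.length h;
       simpa [PySem.Chars.upper, PySem.Chars.lower] using this)
  case pos =>
    rcases w with _ | ⟨a, _ | ⟨b, _ | ⟨e, _ | ⟨f, _ | ⟨g, _ | ⟨x, t⟩⟩⟩⟩⟩⟩ <;> simp_all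
    simp only [PySem.Chars.upper, PySem.Chars.lower, List.map_cons, List.map_nil, List.cons.injEq, and_true]
    constructor <;> rintro ⟨h1, h2, h3, h4, h5⟩ <;>
    refine ⟨?_, ?_, ?_, ?_, ?_⟩ <;>
    first
      | (exact ((pvCh _).1).mpr (((pvCh _).2.1).mp ‹_›))
      | (exact ((pvCh _).2.1).mpr (((pvCh _).1).mp ‹_›))
      | (exact ((pvCh _).2.2.1).mp ‹_›)
      | (exact ((pvCh _).2.2.1).mpr ‹_›)
      | (exact ((pvCh _).2.2.2.1).mp ‹_›)
      | (exact ((pvCh _).2.2.2.1).mpr ‹_›)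
      | (exact ((pvCh _).2.2.2.2).mp ‹_›)
      | (exact ((pvCh _).2.2.2.2).mpr ‹_›)

theorem pvWindow_id (w : List Char) (hw : PySem.Chars.lower w = " and ".toList) (st : Bool × Bool) :
    w.foldl pvQStep st = st := by
  rw [show " and ".toList = [' ', 'a', 'n', 'd', ' '] from by decide] at hw
  rcases w with _ | ⟨a, _ | ⟨b, _ | ⟨e, _ | ⟨f, _ | ⟨g, _ | ⟨x, t⟩⟩⟩⟩⟩⟩ <;>
    simp only [PySem.Chars.lower, List.map_cons, List.map_nil, List.cons.injEq, and_true] at hw <;>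
    try (exfalso; simp at hw)
  obtain ⟨h1, h2, h3, h4, h5⟩ := hw
  have q : ∀ (c : Char) (y : Char), PySem.Chars.lowerChar c = y → y ≠ '\'' → y ≠ '"' →
      ∀ s, pvQStep s c = s := by
    intro c y hc hy1 hy2 s
    have hc1 : c ≠ '\'' := by
      rintro rfl
      rw [show PySem.Chars.lowerChar '\'' = '\'' from by decide] at hc
      exact hy1 hc.symm
    have hc2 : c ≠ '"' := by
      rintro rfl
      rw [show PySem.Chars.lowerChar '"' = '"' from by decide] at hc
      exact hy2 hc.symm
    simp [pvQStep, hc1, hc2]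
  simp only [List.foldl_cons, List.foldl_nil]
  rw [q _ _ h1 (by decide) (by decide), q _ _ h2 (by decide) (by decide),
    q _ _ h3 (by decide) (by decide), q _ _ h4 (by decide) (by decide),
    q _ _ h5 (by decide) (by decide)]

theorem pvMatch_iff (l : List Char) (i : Nat) :
    PySem.Chars.upper ((l.drop i).take 5) = " AND ".toList
      ↔ " and ".toList <+: (PySem.Chars.lower l).drop i := by
  rw [List.prefix_iff_eq_take, pvUpLow5]
  rw [show (PySem.Chars.lower l) = l.map PySem.Chars.lowerChar from rfl,
    ← List.map_drop, ← List.map_take]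
  rw [show (" and ".toList).length = 5 from by decide]
  unfold PySem.Chars.lower
  constructor
  · intro hh; exact hh.symm
  · intro hh; exact hh.symm

theorem pvFF_eq (low sub : List Char) (k m : Nat) (hk : k ≤ low.length)
    (hkm : k ≤ m) (hp : sub <+: low.drop m)
    (hmin : ∀ i, k ≤ i → i < m → ¬ sub <+: low.drop i) :
    PySem.Chars.findFrom low sub (k : Int) none = (m : Int) := by
  have hne : PySem.Chars.findFrom low sub (k : Int) none ≠ -1 := by
    rw [Ne, PySem.Chars.findFrom_natCast_eq_neg_one_iff low sub k hk, not_not]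
    rw [← PySem.Chars.isIn_iff_infix, ← PySem.Chars.exists_prefix_drop_iff_isIn]
    exact ⟨m - k, by rw [List.drop_drop, Nat.add_sub_cancel' hkm]; exact hp⟩
  obtain ⟨hge, hpref, hmin'⟩ := PySem.Chars.findFrom_natCast_spec low sub k hk hne
  set v := PySem.Chars.findFrom low sub (k : Int) none with hv
  have hv0 : 0 ≤ v := le_trans (by exact_mod_cast Nat.zero_le k) hge
  have hkv : k ≤ v.toNat := by omega
  rcases Nat.lt_trichotomy v.toNat m with hlt | heq | hgt
  · exact absurd hpref (hmin _ hkv hlt)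
  · omega
  · exact absurd hp (hmin' m hkm hgt)

theorem pvFF_neg (low sub : List Char) (k : Nat) (hk : k ≤ low.length)
    (h : ∀ i, k ≤ i → ¬ sub <+: low.drop i) :
    PySem.Chars.findFrom low sub (k : Int) none = -1 := by
  rw [PySem.Chars.findFrom_natCast_eq_neg_one_iff low sub k hk]
  intro hinf
  obtain ⟨j, hj⟩ := (PySem.Chars.exists_prefix_drop_iff_isIn sub (low.drop k)).mpr
    ((PySem.Chars.isIn_iff_infix _ _).mpr hinf)
  rw [List.drop_drop] at hj
  exact h (k + j) (by omega) hj

theorem pvFF_here (low sub : List Char) (pos : Nat) (hk : pos ≤ low.length)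
    (hp : sub <+: low.drop pos) :
    PySem.Chars.findFrom low sub (pos : Int) none = (pos : Int) :=
  pvFF_eq low sub pos pos hk le_rfl hp (by omega)

theorem pvFF_step (low sub : List Char) (pos : Nat) (hpos : pos < low.length)
    (h : ¬ sub <+: low.drop pos) :
    PySem.Chars.findFrom low sub (pos : Int) none
      = PySem.Chars.findFrom low sub ((pos + 1 : Nat) : Int) none := by
  by_cases hex : ∃ j, pos + 1 ≤ j ∧ sub <+: low.drop j
  · have hfind := Nat.find_spec hex
    set m := Nat.find hex with hm
    rw [pvFF_eq low sub pos m (by omega) (by omega) hfind.2 ?min1,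
      pvFF_eq low sub (pos + 1) m (by omega) hfind.1 hfind.2 ?min2]
    case min1 =>
      intro i hi1 hi2
      rcases Nat.eq_or_lt_of_le hi1 with rfl | hgt
      · exact h
      · intro hpref
        exact Nat.find_min hex hi2 ⟨hgt, hpref⟩
    case min2 =>
      intro i hi1 hi2 hpref
      exact Nat.find_min hex hi2 ⟨hi1, hpref⟩
  · rw [pvFF_neg low sub pos (by omega) ?h1, pvFF_neg low sub (pos + 1) (by omega) ?h2]
    case h1 =>
      intro i hi
      rcases Nat.eq_or_lt_of_le hi with rfl | hgt
      · exact h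
      · exact fun hpref => hex ⟨i, hgt, hpref⟩
    case h2 => exact fun i hi hpref => hex ⟨i, hi, hpref⟩

theorem pvNoPrefix_of_head (l : List Char) (i : Nat) (h : i < l.length)
    (hq : PySem.Chars.lowerChar l[i] ≠ ' ') :
    ¬ (" and ".toList <+: (PySem.Chars.lower l).drop i) := by
  intro hp
  rw [show " and ".toList = [' ', 'a', 'n', 'd', ' '] from by decide] at hp
  obtain ⟨t, ht⟩ := hp
  have h0 := congrArg (fun xs => xs[0]?) ht
  simp only [List.cons_append, List.getElem?_cons_zero, List.getElem?_drop, Nat.add_zero] at h0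
  rw [show (PySem.Chars.lower l) = l.map PySem.Chars.lowerChar from rfl,
    List.getElem?_map, List.getElem?_eq_getElem h] at h0
  simp at h0
  exact hq h0.symm

-- B's loop at the same fuel only looks at findFrom(pos): stepping pos past a non-split position
theorem pvBLoop_skip (l low : List Char) (mask : List Bool) (f : Nat)
    (clauses : List String) (seg pos : Nat)
    (hstep : PySem.Chars.findFrom low " and ".toList (pos : Int) none
      = PySem.Chars.findFrom low " and ".toList ((pos + 1 : Nat) : Int) none) :
    pvBLoop l low mask (f + 1) clauses seg pos = pvBLoop l low mask (f + 1) clauses seg (pos + 1) := by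
  simp only [pvBLoop]
  rw [hstep]

-- main invariant: A's loop at position i equals B's find-loop at pos = i
theorem pvMain (l : List Char) : ∀ k i (clauses : List String) (s d : Bool) (seg f : Nat),
    l.length - i = k → seg ≤ i → i ≤ l.length →
    (s, d) = (l.take i).foldl pvQStep (false, false) →
    l.length - i < f →
    pvALoop l clauses ((l.drop seg).take (i - seg)) s d i
      = pvBLoop l (PySem.Chars.lower l) (pvMaskSpec l false false) f clauses seg i := by
  intro k
  induction k using Nat.strong_induction_on with
  | _ k IH =>
  intro i clauses s d seg f hk hsegi hi hst hf
  obtain ⟨f1, rfl⟩ : ∃ f1, f = f1 + 1 := ⟨f - 1, by omega⟩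
  have hlow : (PySem.Chars.lower l).length = l.length := by
    simp [PySem.Chars.lower]
  by_cases hin : i < l.length
  case neg =>
    rw [pvALoop.eq_def, dif_neg hin]
    simp only [pvBLoop]
    rw [pvFF_neg _ _ i (by omega) ?nomat]
    case nomat =>
      intro j hj hpref
      rw [List.drop_eq_nil_of_le (by omega), List.prefix_nil] at hpref
      exact absurd hpref (by decide)
    rw [if_pos rfl]
    rw [List.take_of_length_le (by simp; omega)]
    rw [PySem.List.slice_from l (by omega : (0:Int) ≤ (seg : Int))]
    rw [show ((seg : Int)).toNat = seg from rfl]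
  case pos =>
    rw [pvALoop.eq_def, dif_pos hin]
    simp only []
    have hmaski : (pvMaskSpec l false false).getD i false = (s || d) := by
      rw [pvMaskSpec_getD l false false i hin, ← hst]
    have hcur2 : (l.drop seg).take (i - seg) ++ [l[i]] = (l.drop seg).take (i + 1 - seg) := by
      have hh : i - seg < (l.drop seg).length := by simp; omega
      rw [show i + 1 - seg = (i - seg) + 1 by omega, List.take_succ, List.getElem?_eq_getElem hh]
      have hidx : seg + (i - seg) = i := by omega
      simp [List.getElem_drop, hidx]
    by_cases h1 : l[i] = '\'' ∧ d = false
    case pos =>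
      rw [if_pos h1, hcur2]
      have hst' : (!s, d) = (l.take (i + 1)).foldl pvQStep (false, false) := by
        rw [pvQs_succ l i hin, ← hst]
        unfold pvQStep
        rw [if_pos ⟨h1.1, h1.2⟩]
      rw [IH (l.length - (i + 1)) (by omega) (i + 1) clauses (!s) d seg (f1 + 1) rfl
        (by omega) (by omega) hst' (by omega)]
      refine (pvBLoop_skip _ _ _ _ _ _ _ ?_).symm
      refine pvFF_step _ _ i (by omega) ?_
      refine pvNoPrefix_of_head l i hin ?_
      rw [h1.1]
      decide
    case neg =>
    by_cases h2 : l[i] = '"' ∧ s = false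
    case pos =>
      rw [if_neg h1, if_pos h2, hcur2]
      have hst' : (s, !d) = (l.take (i + 1)).foldl pvQStep (false, false) := by
        rw [pvQs_succ l i hin, ← hst]
        unfold pvQStep
        rw [if_neg (fun hc => h1 ⟨hc.1, hc.2⟩), if_pos ⟨h2.1, h2.2⟩]
      rw [IH (l.length - (i + 1)) (by omega) (i + 1) clauses s (!d) seg (f1 + 1) rfl
        (by omega) (by omega) hst' (by omega)]
      refine (pvBLoop_skip _ _ _ _ _ _ _ ?_).symm
      refine pvFF_step _ _ i (by omega) ?_
      refine pvNoPrefix_of_head l i hin ?_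
      rw [h2.1]
      decide
    case neg =>
    have hsl : PySem.List.slice l (some (i : Int)) (some ((i : Int) + 5)) = (l.drop i).take 5 := by
      rw [show ((i : Int) + 5) = (((i + 5 : Nat)) : Int) by push_cast; ring,
        PySem.List.slice_natCast l i (i + 5)]
      congr 1
      omega
    rw [hsl]
    by_cases h3 : s = false ∧ d = false ∧ PySem.Chars.upper ((l.drop i).take 5) = " AND ".toList
    case pos =>
      rw [if_neg h1, if_neg h2, if_pos h3]
      have hlw : PySem.Chars.lower ((l.drop i).take 5) = " and ".toList := (pvUpLow5 _).mp h3.2.2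
      have hm : " and ".toList <+: (PySem.Chars.lower l).drop i := (pvMatch_iff l i).mp h3.2.2
      have hlen5 : i + 5 ≤ l.length := by
        have hlen := congrArg List.length hlw
        simp [PySem.Chars.lower] at hlen
        omega
      have hst5 : (s, d) = (l.take (i + 5)).foldl pvQStep (false, false) := by
        rw [List.take_add, List.foldl_append, ← hst, pvWindow_id _ hlw]
      have hBur := IH (l.length - (i + 5)) (by omega) (i + 5)
        (if PySem.Chars.strip ((l.drop seg).take (i - seg)) ≠ [] then
          clauses ++ [String.mk (PySem.Chars.strip ((l.drop seg).take (i - seg)))] else clauses)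
        s d (i + 5) f1 rfl le_rfl hlen5 hst5 (by omega)
      simp only [Nat.sub_self, List.take_zero] at hBur
      rw [hBur]
      simp only [pvBLoop]
      rw [pvFF_here _ _ i (by omega) hm]
      rw [if_neg (show ¬((i : Int) = -1) by omega)]
      rw [show ((i : Int)).toNat = i from rfl, hmaski, h3.1, h3.2.1]
      simp only [Bool.or_self, Bool.false_eq_true, if_false]
      rw [PySem.List.slice_natCast l seg i]
    case neg =>
      rw [if_neg h1, if_neg h2, if_neg h3]
      rw [hcur2]
      have hqid : pvQStep (s, d) l[i] = (s, d) := by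
        unfold pvQStep
        rw [if_neg (fun hc => h1 ⟨hc.1, hc.2⟩), if_neg (fun hc => h2 ⟨hc.1, hc.2⟩)]
      have hst' : (s, d) = (l.take (i + 1)).foldl pvQStep (false, false) := by
        rw [pvQs_succ l i hin, ← hst, hqid]
      by_cases hmatch : " and ".toList <+: (PySem.Chars.lower l).drop i
      case pos =>
        rw [IH (l.length - (i + 1)) (by omega) (i + 1) clauses s d seg f1 rfl
          (by omega) (by omega) hst' (by omega)]
        have hsd : (s || d) = true := by
          cases s <;> cases d <;>
            first
              | rfl
              | exact absurd ⟨rfl, rfl, (pvMatch_iff l i).mpr hmatch⟩ h3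
        conv_rhs => rw [pvBLoop]
        rw [pvFF_here _ _ i (by omega) hmatch]
        rw [if_neg (show ¬((i : Int) = -1) by omega)]
        rw [show ((i : Int)).toNat = i from rfl, hmaski, hsd]
        simp only [if_true]
      case neg =>
        rw [IH (l.length - (i + 1)) (by omega) (i + 1) clauses s d seg (f1 + 1) rfl
          (by omega) (by omega) hst' (by omega)]
        exact (pvBLoop_skip _ _ _ _ _ _ _ (pvFF_step _ _ i (by omega) hmatch)).symm

-- ===== VERDICT (by name: the statement is the Claim_ definition above) =====
theorem split_where_sql_clauses_py_spec : Claim_equal_split_where_sql_clauses_py := by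
  intro where_sql _
  unfold Spec_split_where_sql_clauses_py split_where_sql_clauses_py split_where_sql_clauses_py_alt
  have hmask : (where_sql.toList.foldl pvMaskLoop ([], false, false)).1
      = pvMaskSpec where_sql.toList false false := by
    rw [pvMaskLoop_eq]; rfl
  simp only [hmask]
  have := pvMain where_sql.toList (where_sql.toList.length) 0 [] false false 0
    (where_sql.toList.length + 2) (by omega) (by omega) (by omega) (by simp) (by omega)
  simpa using this
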